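-- pv_equiv track=rewrite | github.com/vmorris/advent-of-code-2016 | 01/first_visited_twice.py | changeDirection
-- ===== SOURCE A (Python) =====
-- def changeDirection(start, new):
--   ''' start is a cardinal direction N, S, E, W and
--       new is L or R. returns the new cardinal direction.'''
--   if not any(x in 'LR' for x in new):
--     raise ValueError('new direction is not "L" or "R"')
--   if start == "N":
--     if new == "L":
--       return "W"
--     else: return "E"
--   elif start == "S":
--     if new == "L":
--       return "E"
--     else: return "W"
--   elif start == "E":
--     if new == "L":
--       return "N"
--     else: return "S"
--   elif start == "W":
--     if new == "L":
--       return "S"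
--     else: return "N"
--   else:
--     raise ValueError('start must be "N", "S", "E", or "W".')
-- ===== SOURCE B (Python) =====
-- def changeDirection(start, new):
--   ''' start is a cardinal direction N, S, E, W and
--       new is L or R. returns the new cardinal direction.'''
--   if not any(x in 'LR' for x in new):
--     raise ValueError('new direction is not "L" or "R"')
--   dirs = 'NESW'
--   i = dirs.index(start)  # ValueError if start is not a cardinal direction
--   return dirs[(i + (-1 if new == 'L' else 1)) % 4]
-- ===== Notes on version B (the rewrite author's own statement) =====
-- stated objective: simpler
-- what changed: Replaces the sixteen-branch nested if/elif table with modular rotation on the clockwise cycle 'NESW' (index, +/-1 mod 4, index back).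
import Mathlib
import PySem

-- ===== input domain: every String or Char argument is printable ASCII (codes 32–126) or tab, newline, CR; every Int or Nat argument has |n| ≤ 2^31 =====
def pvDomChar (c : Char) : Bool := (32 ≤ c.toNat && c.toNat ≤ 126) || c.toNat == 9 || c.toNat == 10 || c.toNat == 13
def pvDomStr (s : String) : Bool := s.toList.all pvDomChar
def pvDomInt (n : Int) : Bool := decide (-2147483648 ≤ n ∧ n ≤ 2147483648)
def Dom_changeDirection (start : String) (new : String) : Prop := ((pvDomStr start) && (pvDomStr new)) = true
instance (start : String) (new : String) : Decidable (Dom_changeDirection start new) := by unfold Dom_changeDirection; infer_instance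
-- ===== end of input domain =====

-- B replaces A's sixteen-branch nested if/elif table with modular rotation on the clockwise cycle "NESW" (simpler).


-- ===== PORT A =====
-- literal port of A; "" stands for the two 'raise ValueError' paths (excluded by Pre_)
def changeDirection (start : String) (new : String) : String :=
  if ¬ (new.toList.any (fun x => PySem.Chars.isIn [x] "LR".toList)) then ""
  else if start = "N" then (if new = "L" then "W" else "E")
  else if start = "S" then (if new = "L" then "E" else "W")
  else if start = "E" then (if new = "L" then "N" else "S")
  else if start = "W" then (if new = "L" then "S" else "N")
  else ""

-- ===== PORT B =====
-- literal port of Source B; "" stands for the raise paths (validation failure / .index not found / never-hit index miss)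
def changeDirection_alt (start : String) (new : String) : String :=
  if ¬ (new.toList.any (fun x => PySem.Chars.isIn [x] "LR".toList)) then ""
  else
    let dirs := "NESW"
    let i := PySem.Str.find dirs start     -- dirs.index(start): raise when -1
    if i = -1 then ""
    else
      match PySem.Str.pyGet? dirs (PySem.Int.mod (i + (if new = "L" then -1 else 1)) 4) with
      | some c => String.ofList [c]
      | none => ""

-- ===== PRECONDITION & SPEC =====
-- Pre_ excludes exactly the inputs where A raises ValueError: start not one of the four
-- cardinal letters, or new containing neither 'L' nor 'R'.
def Pre_changeDirection (start : String) (new : String) : Prop :=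
  (start = "N" ∨ start = "S" ∨ start = "E" ∨ start = "W") ∧
  ('L' ∈ new.toList ∨ 'R' ∈ new.toList)
instance (start : String) (new : String) : Decidable (Pre_changeDirection start new) := by unfold Pre_changeDirection; infer_instance
def pvWitness_changeDirection : String × String := ("N", "L")
def Spec_changeDirection (start : String) (new : String) (out : String) : Prop := out = changeDirection_alt start new
instance (start : String) (new : String) (out : String) : Decidable (Spec_changeDirection start new out) := by unfold Spec_changeDirection; infer_instance

-- ===== CLAIM (what is proved, stated in full; the proofs are below) =====
def Claim_equal_changeDirection : Prop := ∀ (start : String) (new : String), Dom_changeDirection start new → Pre_changeDirection start new → Spec_changeDirection start new (changeDirection start new)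

-- ===== LEMMAS AND PROOFS =====

-- the validation test of both ports, characterised
lemma isIn_LR_iff (x : Char) : PySem.Chars.isIn [x] "LR".toList = true ↔ (x = 'L' ∨ x = 'R') := by
  rw [PySem.Chars.isIn_iff_infix]
  constructor
  · intro h
    have hx : x ∈ ("LR".toList) := List.singleton_sublist.mp h.sublist
    simpa using hx
  · rintro (rfl | rfl)
    · exact ⟨[], ['R'], rfl⟩
    · exact ⟨['L'], [], rfl⟩

lemma any_LR_of_pre {new : String} (h : 'L' ∈ new.toList ∨ 'R' ∈ new.toList) :
    (new.toList.any (fun x => PySem.Chars.isIn [x] "LR".toList)) = true := by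
  rcases h with hx | hx
  · exact List.any_eq_true.mpr ⟨'L', hx, (isIn_LR_iff _).mpr (Or.inl rfl)⟩
  · exact List.any_eq_true.mpr ⟨'R', hx, (isIn_LR_iff _).mpr (Or.inr rfl)⟩

-- ===== VERDICT (by name: the statement is the Claim_ definition above) =====
theorem changeDirection_spec : Claim_equal_changeDirection := by
  intro start new _ hpre
  obtain ⟨hs, hnew⟩ := hpre
  have hany := any_LR_of_pre hnew
  unfold Spec_changeDirection changeDirection changeDirection_alt
  rcases hs with rfl | rfl | rfl | rfl <;>
    by_cases h : new = "L" <;>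
    simp only [hany, not_true, if_false] <;>
    simp [h, PySem.Str.find, PySem.Int.mod] <;> decide
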